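-- pv_equiv track=rewrite | github.com/Shesher007/MYTH | tools/cache_manager.py | _refine_category
-- ===== SOURCE A (Python) =====
-- def _refine_category(tool_name: str, current_category: str) -> str:
--     """Refine tool category based on name keywords if current category is generic."""
--     # Mapping for common industrial keywords
--     name_lower = tool_name.lower()
--     if any(k in name_lower for k in ["exploit", "attack", "payload", "infect", "pwn", "bypass", "vuln", "nuclei", "injection", "sqli", "xss", "ssrf"]):
--         return "exploitation"
--     if any(k in name_lower for k in ["scan", "recon", "shodan", "census", "whois", "dns", "subdomain", "map", "port", "search"]):
--         return "recon"
--     if any(k in name_lower for k in ["evade", "stealth", "obfuscate", "unhook", "mask", "hide", "av", "edr"]):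
--         return "evasion"
--     if any(k in name_lower for k in ["process", "registry", "service", "system", "health", "disk", "net", "bash", "shell", "cmd"]):
--         return "system"
--     if any(k in name_lower for k in ["github", "repo", "commit", "issue", "branch", "intelligence", "threat", "cve"]):
--         return "intelligence"
--     if any(k in name_lower for k in ["file", "txt", "log", "archive", "compress", "hash", "base64"]):
--         return "utilities"
--     return current_category
-- ===== SOURCE B (Python) =====
-- # Index the 51 keywords in a hash map keyword -> (priority, category), then make a
-- # single pass over all substrings of the lowercased name (lengths 1..12), looking each
-- # up in the map and keeping the hit with the smallest priority.
--
-- _CATS = [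
--     ("exploitation", ["exploit", "attack", "payload", "infect", "pwn", "bypass", "vuln", "nuclei", "injection", "sqli", "xss", "ssrf"]),
--     ("recon", ["scan", "recon", "shodan", "census", "whois", "dns", "subdomain", "map", "port", "search"]),
--     ("evasion", ["evade", "stealth", "obfuscate", "unhook", "mask", "hide", "av", "edr"]),
--     ("system", ["process", "registry", "service", "system", "health", "disk", "net", "bash", "shell", "cmd"]),
--     ("intelligence", ["github", "repo", "commit", "issue", "branch", "intelligence", "threat", "cve"]),
--     ("utilities", ["file", "txt", "log", "archive", "compress", "hash", "base64"]),
-- ]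
-- KW2CAT = {kw: (p, cat) for p, (cat, kws) in enumerate(_CATS) for kw in kws}
-- MAXLEN = 12  # longest keyword ("intelligence")
--
-- def _refine_category(tool_name: str, current_category: str) -> str:
--     s = tool_name.lower()
--     n = len(s)
--     best = None
--     for i in range(n):
--         for j in range(i + 1, min(i + MAXLEN, n) + 1):
--             hit = KW2CAT.get(s[i:j])
--             if hit is not None and (best is None or hit[0] < best[0]):
--                 best = hit
--     return best[1] if best is not None else current_category
-- ===== Notes on version B (the rewrite author's own statement) =====
-- stated objective: alternative
-- what changed: Instead of searching the name for each of the 55 keywords group by group, B indexes the keywords in a hash map keyword -> (priority, category), enumerates the substrings of the lowercased name (lengths 1..12) once, looks each up in the map, and returns the category of the minimum-priority hit (or current_category if none).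
import Mathlib
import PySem

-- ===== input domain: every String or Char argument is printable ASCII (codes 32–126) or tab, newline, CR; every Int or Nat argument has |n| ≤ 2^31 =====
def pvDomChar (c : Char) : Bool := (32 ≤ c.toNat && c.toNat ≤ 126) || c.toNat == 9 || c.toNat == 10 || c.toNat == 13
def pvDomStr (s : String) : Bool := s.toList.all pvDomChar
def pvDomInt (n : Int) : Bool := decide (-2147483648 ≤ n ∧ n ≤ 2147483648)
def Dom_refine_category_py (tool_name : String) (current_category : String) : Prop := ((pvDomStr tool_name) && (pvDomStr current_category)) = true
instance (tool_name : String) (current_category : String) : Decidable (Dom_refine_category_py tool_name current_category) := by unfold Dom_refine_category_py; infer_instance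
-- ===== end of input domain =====

-- B replaces A's per-keyword substring searches by one pass over the name's substrings
-- (lengths 1..12) looked up in a keyword -> (priority, category) hash map, keeping the
-- hit with the smallest priority; objective: alternative (same result, different algorithm).

-- ===== PORT A =====
-- literal transliteration: lowercase once, then six `if any(...)` branches in order
def refine_category_py (tool_name : String) (current_category : String) : String :=
  let name_lower := PySem.Str.lower tool_name
  if (["exploit", "attack", "payload", "infect", "pwn", "bypass", "vuln", "nuclei", "injection", "sqli", "xss", "ssrf"].any (fun k => PySem.Str.isIn k name_lower)) then "exploitation"
  else if (["scan", "recon", "shodan", "census", "whois", "dns", "subdomain", "map", "port", "search"].any (fun k => PySem.Str.isIn k name_lower)) then "recon"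
  else if (["evade", "stealth", "obfuscate", "unhook", "mask", "hide", "av", "edr"].any (fun k => PySem.Str.isIn k name_lower)) then "evasion"
  else if (["process", "registry", "service", "system", "health", "disk", "net", "bash", "shell", "cmd"].any (fun k => PySem.Str.isIn k name_lower)) then "system"
  else if (["github", "repo", "commit", "issue", "branch", "intelligence", "threat", "cve"].any (fun k => PySem.Str.isIn k name_lower)) then "intelligence"
  else if (["file", "txt", "log", "archive", "compress", "hash", "base64"].any (fun k => PySem.Str.isIn k name_lower)) then "utilities"
  else current_category

-- ===== PORT B =====
-- Source B's KW2CAT: the 55 keywords indexed by a dict keyword -> (priority, category)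
def pvKw2Cat : PySem.Dict (List Char) (Int × String) := PySem.Dict.ofList
  [("exploit".toList, ((0 : Int), "exploitation")),
   ("attack".toList, ((0 : Int), "exploitation")),
   ("payload".toList, ((0 : Int), "exploitation")),
   ("infect".toList, ((0 : Int), "exploitation")),
   ("pwn".toList, ((0 : Int), "exploitation")),
   ("bypass".toList, ((0 : Int), "exploitation")),
   ("vuln".toList, ((0 : Int), "exploitation")),
   ("nuclei".toList, ((0 : Int), "exploitation")),
   ("injection".toList, ((0 : Int), "exploitation")),
   ("sqli".toList, ((0 : Int), "exploitation")),
   ("xss".toList, ((0 : Int), "exploitation")),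
   ("ssrf".toList, ((0 : Int), "exploitation")),
   ("scan".toList, ((1 : Int), "recon")),
   ("recon".toList, ((1 : Int), "recon")),
   ("shodan".toList, ((1 : Int), "recon")),
   ("census".toList, ((1 : Int), "recon")),
   ("whois".toList, ((1 : Int), "recon")),
   ("dns".toList, ((1 : Int), "recon")),
   ("subdomain".toList, ((1 : Int), "recon")),
   ("map".toList, ((1 : Int), "recon")),
   ("port".toList, ((1 : Int), "recon")),
   ("search".toList, ((1 : Int), "recon")),
   ("evade".toList, ((2 : Int), "evasion")),
   ("stealth".toList, ((2 : Int), "evasion")),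
   ("obfuscate".toList, ((2 : Int), "evasion")),
   ("unhook".toList, ((2 : Int), "evasion")),
   ("mask".toList, ((2 : Int), "evasion")),
   ("hide".toList, ((2 : Int), "evasion")),
   ("av".toList, ((2 : Int), "evasion")),
   ("edr".toList, ((2 : Int), "evasion")),
   ("process".toList, ((3 : Int), "system")),
   ("registry".toList, ((3 : Int), "system")),
   ("service".toList, ((3 : Int), "system")),
   ("system".toList, ((3 : Int), "system")),
   ("health".toList, ((3 : Int), "system")),
   ("disk".toList, ((3 : Int), "system")),
   ("net".toList, ((3 : Int), "system")),
   ("bash".toList, ((3 : Int), "system")),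
   ("shell".toList, ((3 : Int), "system")),
   ("cmd".toList, ((3 : Int), "system")),
   ("github".toList, ((4 : Int), "intelligence")),
   ("repo".toList, ((4 : Int), "intelligence")),
   ("commit".toList, ((4 : Int), "intelligence")),
   ("issue".toList, ((4 : Int), "intelligence")),
   ("branch".toList, ((4 : Int), "intelligence")),
   ("intelligence".toList, ((4 : Int), "intelligence")),
   ("threat".toList, ((4 : Int), "intelligence")),
   ("cve".toList, ((4 : Int), "intelligence")),
   ("file".toList, ((5 : Int), "utilities")),
   ("txt".toList, ((5 : Int), "utilities")),
   ("log".toList, ((5 : Int), "utilities")),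
   ("archive".toList, ((5 : Int), "utilities")),
   ("compress".toList, ((5 : Int), "utilities")),
   ("hash".toList, ((5 : Int), "utilities")),
   ("base64".toList, ((5 : Int), "utilities"))]

-- Source B's nested loops over i in range(n), j in range(i+1, min(i+12, n)+1):
-- look up s[i:j] and keep the hit with the smallest priority (strict '<': first kept)
def refine_category_py_alt (tool_name : String) (current_category : String) : String :=
  let s := (PySem.Str.lower tool_name).toList
  let n : Int := s.length
  let best : Option (Int × String) :=
    (PySem.List.pyRange 0 n 1).foldl (fun best i =>
      (PySem.List.pyRange (i + 1) (min (i + 12) n + 1) 1).foldl (fun best j =>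
        match pvKw2Cat.get? (PySem.List.slice s (some i) (some j)) with
        | some hit =>
          match best with
          | none => some hit
          | some b => if hit.1 < b.1 then some hit else some b
        | none => best) best) none
  match best with
  | some b => b.2
  | none => current_category

-- ===== PRECONDITION & SPEC =====
def Spec_refine_category_py (tool_name : String) (current_category : String) (out : String) : Prop := out = refine_category_py_alt tool_name current_category
instance (tool_name : String) (current_category : String) (out : String) : Decidable (Spec_refine_category_py tool_name current_category out) := by unfold Spec_refine_category_py; infer_instance

-- ===== CLAIM (what is proved, stated in full; the proofs are below) =====
def Claim_equal_refine_category_py : Prop := ∀ (tool_name : String) (current_category : String), Dom_refine_category_py tool_name current_category → Spec_refine_category_py tool_name current_category (refine_category_py tool_name current_category)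

-- ===== LEMMAS AND PROOFS =====

-- the priority list, the keyword group of a priority, and its category name
def pvPs : List Int := [0, 1, 2, 3, 4, 5]

def pvGroups (p : Int) : List String :=
  if p = 0 then ["exploit", "attack", "payload", "infect", "pwn", "bypass", "vuln", "nuclei", "injection", "sqli", "xss", "ssrf"]
  else if p = 1 then ["scan", "recon", "shodan", "census", "whois", "dns", "subdomain", "map", "port", "search"]
  else if p = 2 then ["evade", "stealth", "obfuscate", "unhook", "mask", "hide", "av", "edr"]
  else if p = 3 then ["process", "registry", "service", "system", "health", "disk", "net", "bash", "shell", "cmd"]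
  else if p = 4 then ["github", "repo", "commit", "issue", "branch", "intelligence", "threat", "cve"]
  else if p = 5 then ["file", "txt", "log", "archive", "compress", "hash", "base64"]
  else []

def pvCat (p : Int) : String :=
  if p = 0 then "exploitation" else if p = 1 then "recon" else if p = 2 then "evasion"
  else if p = 3 then "system" else if p = 4 then "intelligence" else if p = 5 then "utilities" else ""

-- "some keyword of priority p occurs in s"
def pvP (p : Int) (s : List Char) : Prop := ∃ kw ∈ pvGroups p, kw.toList <:+: s

-- the accumulator step of B's loop
def pvStep : Option (Int × String) → (Int × String) → Option (Int × String) :=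
  fun best hit =>
    match best with
    | none => some hit
    | some b => if hit.1 < b.1 then some hit else some b

-- the (i, j) pairs B's nested loops enumerate
def pvPairs (n : Int) : List (Int × Int) :=
  (PySem.List.pyRange 0 n 1).flatMap (fun i =>
    (PySem.List.pyRange (i + 1) (min (i + 12) n + 1) 1).map (fun j => (i, j)))

-- the hits B's loop feeds to pvStep
def pvHits (s : List Char) : List (Int × String) :=
  (pvPairs s.length).filterMap (fun ij => pvKw2Cat.get? (PySem.List.slice s (some ij.1) (some ij.2)))

def pvBest (s : List Char) : Option (Int × String) := (pvHits s).foldl pvStep none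

-- closed facts about the keyword table, checked by the kernel
set_option maxRecDepth 10000 in
theorem pvF3 : ∀ q ∈ pvKw2Cat.items, q.2.1 ∈ pvPs ∧ q.2.2 = pvCat q.2.1 ∧ ∃ kw ∈ pvGroups q.2.1, kw.toList = q.1 := by decide

set_option maxRecDepth 10000 in
theorem pvF4 : ∀ p ∈ pvPs, ∀ kw ∈ pvGroups p, pvKw2Cat.get? kw.toList = some (p, pvCat p) := by decide

set_option maxRecDepth 10000 in
theorem pvFlen : ∀ q ∈ pvKw2Cat.items, 1 ≤ q.1.length ∧ q.1.length ≤ 12 := by decide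

-- a fold that skips `none` lookups is a fold over the filterMap
theorem pv_foldl_filterMap (l : List (Int × Int)) (f : (Int × Int) → Option (Int × String))
    (init : Option (Int × String)) :
    l.foldl (fun acc a => match f a with | some b => pvStep acc b | none => acc) init
      = (l.filterMap f).foldl pvStep init := by
  induction l generalizing init with
  | nil => rfl
  | cons x xs ih => cases h : f x <;> simp [h, ih]

-- B's nested loops compute pvBest
theorem pv_alt_eq (tool_name : String) (current_category : String) :
    refine_category_py_alt tool_name current_category
      = match pvBest ((PySem.Str.lower tool_name).toList) with
        | some b => b.2
        | none => current_category := by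
  unfold refine_category_py_alt pvBest pvHits pvPairs
  rw [← pv_foldl_filterMap, List.foldl_flatMap]
  simp only [List.foldl_map]
  simp only [pvStep]

-- once the accumulator is `some`, it stays `some`
theorem pvFold_isSome (l : List (Int × String)) (b : Int × String) :
    ∃ b', l.foldl pvStep (some b) = some b' := by
  induction l generalizing b with
  | nil => exact ⟨b, rfl⟩
  | cons x xs ih =>
    have hstep : pvStep (some b) x = if x.1 < b.1 then some x else some b := rfl
    rw [List.foldl_cons, hstep]
    split <;> exact ih _

theorem pvFold_none_iff (l : List (Int × String)) :
    l.foldl pvStep none = none ↔ l = [] := by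
  cases l with
  | nil => simp
  | cons x xs =>
    simp only [List.foldl_cons]
    obtain ⟨b', hb'⟩ := pvFold_isSome xs x
    show xs.foldl pvStep (some x) = none ↔ _
    simp [hb']

-- the fold keeps an element of minimal priority
theorem pvFold_min (l : List (Int × String)) :
    ∀ (a b : Int × String), l.foldl pvStep (some a) = some b →
      (b = a ∨ b ∈ l) ∧ b.1 ≤ a.1 ∧ ∀ x ∈ l, b.1 ≤ x.1 := by
  induction l with
  | nil =>
    intro a b h
    simp only [List.foldl_nil, Option.some.injEq] at h
    exact ⟨Or.inl h.symm, le_of_eq (by rw [h]), by simp⟩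
  | cons x xs ih =>
    intro a b h
    have hstep : pvStep (some a) x = if x.1 < a.1 then some x else some a := rfl
    simp only [List.foldl_cons, hstep] at h
    by_cases hx : x.1 < a.1
    · rw [if_pos hx] at h
      obtain ⟨hmem, hle, hall⟩ := ih x b h
      refine ⟨?_, ?_, ?_⟩
      · rcases hmem with rfl | hm
        · exact Or.inr (List.mem_cons_self)
        · exact Or.inr (List.mem_cons_of_mem _ hm)
      · omega
      · intro y hy
        rcases List.mem_cons.mp hy with rfl | hm
        · exact hle
        · exact hall y hm
    · rw [if_neg hx] at h
      obtain ⟨hmem, hle, hall⟩ := ih a b h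
      refine ⟨?_, hle, ?_⟩
      · rcases hmem with rfl | hm
        · exact Or.inl rfl
        · exact Or.inr (List.mem_cons_of_mem _ hm)
      · intro y hy
        rcases List.mem_cons.mp hy with rfl | hm
        · omega
        · exact hall y hm

theorem pvBest_spec (s : List Char) (b : Int × String) (h : pvBest s = some b) :
    b ∈ pvHits s ∧ ∀ x ∈ pvHits s, b.1 ≤ x.1 := by
  unfold pvBest at h
  cases hl : pvHits s with
  | nil => rw [hl] at h; simp at h
  | cons y ys =>
    rw [hl] at h
    simp only [List.foldl_cons] at h
    have h' : ys.foldl pvStep (some y) = some b := h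
    obtain ⟨hmem, hle, hall⟩ := pvFold_min ys y b h'
    refine ⟨?_, ?_⟩
    · rcases hmem with rfl | hm
      · exact List.mem_cons_self
      · exact List.mem_cons_of_mem _ hm
    · intro x hx
      rcases List.mem_cons.mp hx with rfl | hm
      · exact hle
      · exact hall x hm

theorem pv_mem_pvPairs (n i j : Int) :
    (i, j) ∈ pvPairs n ↔ 0 ≤ i ∧ i < n ∧ i + 1 ≤ j ∧ j ≤ min (i + 12) n := by
  simp only [pvPairs, List.mem_flatMap, List.mem_map, PySem.List.mem_pyRange_one, Prod.mk.injEq]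
  constructor
  · rintro ⟨a, ⟨ha0, han⟩, b, ⟨hb1, hb2⟩, rfl, rfl⟩
    exact ⟨ha0, han, hb1, by omega⟩
  · rintro ⟨h0, h1, h2, h3⟩
    exact ⟨i, ⟨h0, h1⟩, j, ⟨h2, by omega⟩, rfl, rfl⟩

theorem pv_slice_infix (s : List Char) (a b : Int) (ha : 0 ≤ a) (hb : 0 ≤ b) :
    PySem.List.slice s (some a) (some b) <:+: s := by
  rw [PySem.List.slice_toNat s ha hb]
  exact ((List.take_prefix _ _).isInfix).trans ((List.drop_suffix _ _).isInfix)

theorem pv_mem_pvHits (s : List Char) (x : Int × String) :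
    x ∈ pvHits s ↔ ∃ kw, pvKw2Cat.get? kw = some x ∧ kw <:+: s := by
  constructor
  · intro hx
    obtain ⟨ij, hij, hget⟩ := List.mem_filterMap.mp hx
    obtain ⟨i, j⟩ := ij
    obtain ⟨h0, h1, h2, h3⟩ := (pv_mem_pvPairs s.length i j).mp hij
    exact ⟨_, hget, pv_slice_infix s i j h0 (by omega)⟩
  · rintro ⟨kw, hget, hinf⟩
    have hitem := PySem.Dict.mem_items_of_get?_eq_some pvKw2Cat hget
    obtain ⟨hlen1, hlen2⟩ := pvFlen _ hitem
    have hk1 : 1 ≤ kw.length := hlen1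
    have hk2 : kw.length ≤ 12 := hlen2
    obtain ⟨u, v, huv⟩ := hinf
    refine List.mem_filterMap.mpr ⟨((u.length : Int), ((u.length + kw.length : Nat) : Int)), ?_, ?_⟩
    · rw [pv_mem_pvPairs]
      have hslen : s.length = u.length + kw.length + v.length := by
        rw [← huv]; simp; omega
      push_cast
      refine ⟨by omega, by omega, by omega, le_min (by omega) (by omega)⟩
    · have : PySem.List.slice s (some (u.length : Int)) (some ((u.length + kw.length : Nat) : Int))
          = kw := by
        rw [PySem.List.slice_natCast s]
        rw [← huv, List.append_assoc, List.drop_left]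
        simp
      rw [this, hget]

-- if priority p matches and no smaller priority matches, the scan returns (p, pvCat p)
theorem pvBest_cat (s : List Char) (p : Int) (hp : p ∈ pvPs) (h : pvP p s)
    (hlow : ∀ p' ∈ pvPs, p' < p → ¬ pvP p' s) :
    pvBest s = some (p, pvCat p) := by
  obtain ⟨kw, hkw, hinf⟩ := h
  have hget := pvF4 p hp kw hkw
  have hmem : (p, pvCat p) ∈ pvHits s := (pv_mem_pvHits s _).mpr ⟨_, hget, hinf⟩
  cases hb : pvBest s with
  | none =>
    have : pvHits s = [] := (pvFold_none_iff _).mp hb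
    rw [this] at hmem; simp at hmem
  | some b =>
    obtain ⟨hbmem, hmin⟩ := pvBest_spec s b hb
    obtain ⟨kw', hget', hinf'⟩ := (pv_mem_pvHits s b).mp hbmem
    have hitem := PySem.Dict.mem_items_of_get?_eq_some pvKw2Cat hget'
    obtain ⟨hbp, hbcat, kwS, hkwS, hkwSe⟩ := pvF3 _ hitem
    have hPb : pvP b.1 s := ⟨kwS, hkwS, by rw [hkwSe]; exact hinf'⟩
    have hble : b.1 ≤ p := hmin _ hmem
    have hbge : ¬ b.1 < p := fun hlt => hlow b.1 hbp hlt hPb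
    have hbeq : b.1 = p := by omega
    have : b = (p, pvCat p) := by
      obtain ⟨b1, b2⟩ := b
      simp only at hbeq hbcat
      rw [hbeq] at hbcat ⊢
      rw [hbcat]
    rw [this]

theorem pvBest_none (s : List Char) (hall : ∀ p ∈ pvPs, ¬ pvP p s) :
    pvBest s = none := by
  have hnil : pvHits s = [] := by
    rw [List.eq_nil_iff_forall_not_mem]
    intro x hx
    obtain ⟨kw, hget, hinf⟩ := (pv_mem_pvHits s x).mp hx
    have hitem := PySem.Dict.mem_items_of_get?_eq_some pvKw2Cat hget
    obtain ⟨hxp, _, kwS, hkwS, hkwSe⟩ := pvF3 _ hitem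
    exact hall x.1 hxp ⟨kwS, hkwS, by rw [hkwSe]; exact hinf⟩
  unfold pvBest
  rw [hnil]
  rfl

-- ===== VERDICT (by name: the statement is the Claim_ definition above) =====
theorem refine_category_py_spec : Claim_equal_refine_category_py := by
  intro t c _
  unfold Spec_refine_category_py
  rw [pv_alt_eq]
  simp only [refine_category_py]
  show (if ((pvGroups 0).any fun k => PySem.Str.isIn k (PySem.Str.lower t)) = true then "exploitation"
    else if ((pvGroups 1).any fun k => PySem.Str.isIn k (PySem.Str.lower t)) = true then "recon"
    else if ((pvGroups 2).any fun k => PySem.Str.isIn k (PySem.Str.lower t)) = true then "evasion"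
    else if ((pvGroups 3).any fun k => PySem.Str.isIn k (PySem.Str.lower t)) = true then "system"
    else if ((pvGroups 4).any fun k => PySem.Str.isIn k (PySem.Str.lower t)) = true then "intelligence"
    else if ((pvGroups 5).any fun k => PySem.Str.isIn k (PySem.Str.lower t)) = true then "utilities"
    else c) = match pvBest (PySem.Str.lower t).toList with | some b => b.2 | none => c
  have hc : ∀ p ∈ pvPs,
      (((pvGroups p).any (fun k => PySem.Str.isIn k (PySem.Str.lower t))) = true
        ↔ pvP p ((PySem.Str.lower t).toList)) := by
    intro p _
    simp [pvP, List.any_eq_true, PySem.Chars.isIn_iff_infix]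
  have c0 := hc 0 (by decide)
  have c1 := hc 1 (by decide)
  have c2 := hc 2 (by decide)
  have c3 := hc 3 (by decide)
  have c4 := hc 4 (by decide)
  have c5 := hc 5 (by decide)
  by_cases h0 : pvP 0 ((PySem.Str.lower t).toList)
  · rw [if_pos (c0.mpr h0), pvBest_cat _ 0 (by decide) h0 (by intro p' hp' hlt; exact absurd hlt (by simp [pvPs] at hp'; omega))]
    rfl
  · rw [if_neg (fun hb => h0 (c0.mp hb))]
    by_cases h1 : pvP 1 ((PySem.Str.lower t).toList)
    · rw [if_pos (c1.mpr h1), pvBest_cat _ 1 (by decide) h1 (by intro p' hp' hlt; simp [pvPs] at hp'; rcases hp' with rfl|rfl|rfl|rfl|rfl|rfl <;> first | assumption | (exact absurd hlt (by omega)))]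
      rfl
    · rw [if_neg (fun hb => h1 (c1.mp hb))]
      by_cases h2 : pvP 2 ((PySem.Str.lower t).toList)
      · rw [if_pos (c2.mpr h2), pvBest_cat _ 2 (by decide) h2 (by intro p' hp' hlt; simp [pvPs] at hp'; rcases hp' with rfl|rfl|rfl|rfl|rfl|rfl <;> first | assumption | (exact absurd hlt (by omega)))]
        rfl
      · rw [if_neg (fun hb => h2 (c2.mp hb))]
        by_cases h3 : pvP 3 ((PySem.Str.lower t).toList)
        · rw [if_pos (c3.mpr h3), pvBest_cat _ 3 (by decide) h3 (by intro p' hp' hlt; simp [pvPs] at hp'; rcases hp' with rfl|rfl|rfl|rfl|rfl|rfl <;> first | assumption | (exact absurd hlt (by omega)))]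
          rfl
        · rw [if_neg (fun hb => h3 (c3.mp hb))]
          by_cases h4 : pvP 4 ((PySem.Str.lower t).toList)
          · rw [if_pos (c4.mpr h4), pvBest_cat _ 4 (by decide) h4 (by intro p' hp' hlt; simp [pvPs] at hp'; rcases hp' with rfl|rfl|rfl|rfl|rfl|rfl <;> first | assumption | (exact absurd hlt (by omega)))]
            rfl
          · rw [if_neg (fun hb => h4 (c4.mp hb))]
            by_cases h5 : pvP 5 ((PySem.Str.lower t).toList)
            · rw [if_pos (c5.mpr h5), pvBest_cat _ 5 (by decide) h5 (by intro p' hp' hlt; simp [pvPs] at hp'; rcases hp' with rfl|rfl|rfl|rfl|rfl|rfl <;> first | assumption | (exact absurd hlt (by omega)))]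
              rfl
            · rw [if_neg (fun hb => h5 (c5.mp hb))]
              rw [pvBest_none _ (by intro p hp; simp [pvPs] at hp; rcases hp with rfl|rfl|rfl|rfl|rfl|rfl <;> assumption)]
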